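-- pv_equiv track=rewrite | github.com/dsnopek/godot | header-to-json.py | clean_empty_strings
-- ===== SOURCE A (Python) =====
-- def clean_empty_strings(list_of_strings):
--     out = []
--
--     prev_was_empty = False
--     for s in list_of_strings:
--         if s == "":
--             if not prev_was_empty:
--                 out.append(s)
--                 prev_was_empty = True
--         else:
--             out.append(s)
--             prev_was_empty = False
--
--     while len(out) > 0 and out[0] == "":
--         out = out[1:]
--     while len(out) > 0 and out[-1] == "":
--         out = out[:-1]
--
--     return out
-- ===== SOURCE B (Python) =====
-- def clean_empty_strings(list_of_strings):
--     # Split into maximal blocks of non-empty strings (skipping empties by index),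
--     # then join the blocks with a single "" separator: no collapse flag, no trimming.
--     n = len(list_of_strings)
--     blocks = []
--     i = 0
--     while i < n:
--         if list_of_strings[i] == "":
--             i += 1
--         else:
--             j = i
--             while j < n and list_of_strings[j] != "":
--                 j += 1
--             blocks.append(list_of_strings[i:j])
--             i = j
--     if not blocks:
--         return []
--     result = list(blocks[0])
--     for b in blocks[1:]:
--         result.append("")
--         result.extend(b)
--     return result
-- ===== Notes on version B (the rewrite author's own statement) =====
-- stated objective: alternative
-- what changed: Instead of A's collapse-with-a-flag pass followed by two trimming while-loops, B extracts the maximal blocks of consecutive non-empty strings by index scanning and then intercalates the blocks with a single empty-string separator, so no collapsing or end-trimming ever happens.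
import Mathlib
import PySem

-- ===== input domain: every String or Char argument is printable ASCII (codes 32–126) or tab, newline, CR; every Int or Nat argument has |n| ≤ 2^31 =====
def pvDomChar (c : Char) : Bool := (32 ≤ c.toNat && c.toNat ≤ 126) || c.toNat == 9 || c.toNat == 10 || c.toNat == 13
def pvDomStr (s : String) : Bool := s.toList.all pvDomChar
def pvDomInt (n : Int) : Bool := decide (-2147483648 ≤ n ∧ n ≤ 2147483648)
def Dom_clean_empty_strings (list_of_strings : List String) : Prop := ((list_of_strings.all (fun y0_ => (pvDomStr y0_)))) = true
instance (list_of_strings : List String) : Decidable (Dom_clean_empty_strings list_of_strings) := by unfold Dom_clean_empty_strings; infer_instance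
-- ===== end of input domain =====

-- B replaces A's collapse-with-a-flag pass plus two trimming while-loops by extracting the
-- maximal blocks of consecutive non-empty strings (index scan) and intercalating them with a
-- single "" separator (alternative decomposition, same cost).

-- ===== PORT A =====
-- the for-loop of A, with state (out, prev_was_empty)
def pvLoopA : List String → List String → Bool → List String
  | [], out, _ => out
  | s :: rest, out, prev =>
    if s = "" then
      if !prev then pvLoopA rest (out ++ [s]) true
      else pvLoopA rest out prev
    else pvLoopA rest (out ++ [s]) false

-- while len(out) > 0 and out[0] == "": out = out[1:]
def pvTrimFrontA : List String → List String
  | [] => []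
  | x :: xs => if x = "" then pvTrimFrontA xs else x :: xs

-- while len(out) > 0 and out[-1] == "": out = out[:-1]
def pvTrimBackA (l : List String) : List String :=
  if l ≠ [] ∧ l.getLast? = some "" then pvTrimBackA l.dropLast else l
termination_by l.length
decreasing_by
  cases l with
  | nil => simp_all
  | cons a t => simp

def clean_empty_strings (list_of_strings : List String) : List String :=
  pvTrimBackA (pvTrimFrontA (pvLoopA list_of_strings [] false))

-- ===== PORT B =====
-- inner while: 'while j < n and list_of_strings[j] != "": j += 1' (j < n, so getD is exact)
def pvScanB (l : List String) (n : Nat) (j : Nat) : Nat :=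
  if j < n ∧ l.getD j "" ≠ "" then pvScanB l n (j + 1) else j
termination_by n - j
decreasing_by omega

theorem pvScanB_ge (l : List String) (n j : Nat) : j ≤ pvScanB l n j := by
  unfold pvScanB
  split
  · have := pvScanB_ge l n (j + 1); omega
  · exact le_refl j
termination_by n - j
decreasing_by omega

-- outer while over i; list_of_strings[i:j] = (l.drop i).take (j - i), exact for 0 ≤ i ≤ j
def pvBlocksB (l : List String) (n : Nat) (i : Nat) : List (List String) :=
  if _h : i < n then
    if hc : l.getD i "" = "" then pvBlocksB l n (i + 1)
    else ((l.drop i).take (pvScanB l n i - i)) :: pvBlocksB l n (pvScanB l n i)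
  else []
termination_by n - i
decreasing_by
  · omega
  · have h1 : pvScanB l n i = pvScanB l n (i + 1) := by
      rw [pvScanB, if_pos ⟨_h, hc⟩]
    have h2 := pvScanB_ge l n (i + 1)
    omega

def clean_empty_strings_alt (list_of_strings : List String) : List String :=
  match pvBlocksB list_of_strings list_of_strings.length 0 with
  | [] => []
  | b :: bs => bs.foldl (fun result b' => (result ++ [""]) ++ b') b

-- ===== PRECONDITION & SPEC =====
def Spec_clean_empty_strings (list_of_strings : List String) (out : List String) : Prop := out = clean_empty_strings_alt list_of_strings
instance (list_of_strings : List String) (out : List String) : Decidable (Spec_clean_empty_strings list_of_strings out) := by unfold Spec_clean_empty_strings; infer_instance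

-- ===== CLAIM (what is proved, stated in full; the proofs are below) =====
def Claim_equal_clean_empty_strings : Prop := ∀ (list_of_strings : List String), Dom_clean_empty_strings list_of_strings → Spec_clean_empty_strings list_of_strings (clean_empty_strings list_of_strings)

-- ===== LEMMAS AND PROOFS =====

-- canonical collapse with a "previous was empty" flag (A's loop, as a structural function)
def pvColl : Bool → List String → List String
  | _, [] => []
  | p, x :: xs =>
    if x = "" then (if p then pvColl true xs else "" :: pvColl true xs)
    else x :: pvColl false xs

-- blocks of consecutive non-empty strings, as structural recursion
def pvBlocksL (l : List String) : List (List String) :=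
  match l with
  | [] => []
  | x :: xs =>
    if x = "" then pvBlocksL xs
    else (x :: xs.takeWhile (fun s => s != "")) :: pvBlocksL (xs.dropWhile (fun s => s != ""))
termination_by l.length
decreasing_by
  · simp
  · exact Nat.lt_succ_of_le (List.length_dropWhile_le _ _)

-- intercalate the blocks with a single ""
def pvJoinB : List (List String) → List String
  | [] => []
  | b :: bs => b ++ bs.flatMap (fun b' => "" :: b')

theorem pvLoopA_eq (l : List String) : ∀ out p, pvLoopA l out p = out ++ pvColl p l := by
  induction l with
  | nil => simp [pvLoopA, pvColl]
  | cons x xs ih =>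
    intro out p
    by_cases hx : x = "" <;> cases p <;> simp [pvLoopA, pvColl, hx, ih]

theorem pvColl_false_pre (e : List String) (he : ∀ s ∈ e, s ≠ "") (r : List String) :
    pvColl false (e ++ r) = e ++ pvColl false r := by
  induction e with
  | nil => simp
  | cons x xs ih =>
    have hx : x ≠ "" := he x (by simp)
    simp only [List.cons_append, pvColl, if_neg hx]
    rw [ih (fun s hs => he s (by simp [hs]))]

theorem pvColl_true_head (l : List String) : ∀ y ∈ (pvColl true l).head?, y ≠ "" := by
  induction l with
  | nil => simp [pvColl]
  | cons x xs ih =>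
    by_cases hx : x = ""
    · simpa [pvColl, hx] using ih
    · simp [pvColl, hx]

theorem pvTrimFrontA_id (m : List String) (h : ∀ y ∈ m.head?, y ≠ "") :
    pvTrimFrontA m = m := by
  cases m with
  | nil => rfl
  | cons x xs => simp [pvTrimFrontA, h x (by simp)]

theorem pvTrimFrontA_coll (l : List String) :
    pvTrimFrontA (pvColl false l) = pvColl true l := by
  cases l with
  | nil => rfl
  | cons x xs =>
    by_cases hx : x = ""
    · simp only [pvColl, if_pos hx, Bool.false_eq_true, if_neg (by simp : ¬False)]
      simp only [pvTrimFrontA]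
      exact pvTrimFrontA_id _ (pvColl_true_head xs)
    · simp [pvColl, pvTrimFrontA, hx]

theorem pvTrimBackA_eq_rdrop (l : List String) :
    pvTrimBackA l = List.rdropWhile (fun s => s == "") l := by
  induction l using List.reverseRecOn with
  | nil => simp [pvTrimBackA, List.rdropWhile]
  | append_singleton u a ih =>
    by_cases ha : a = ""
    · rw [pvTrimBackA, if_pos ⟨by simp, by simp [ha]⟩, List.dropLast_concat, ih,
        List.rdropWhile_concat_pos _ _ _ (by simp [ha])]
    · rw [pvTrimBackA, if_neg (by simp [ha]), List.rdropWhile_concat_neg _ _ _ (by simp [ha])]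

theorem pvRdw_id (m : List String) (h : ∀ y ∈ m, y ≠ "") :
    List.rdropWhile (fun s => s == "") m = m := by
  rw [List.rdropWhile_eq_self_iff]
  intro hl
  simpa using h _ (List.getLast_mem hl)

theorem pvRdw_append (u v : List String) :
    List.rdropWhile (fun s => s == "") (u ++ v)
      = if (List.rdropWhile (fun s => s == "") v).isEmpty
        then List.rdropWhile (fun s => s == "") u
        else u ++ List.rdropWhile (fun s => s == "") v := by
  by_cases h : List.dropWhile (fun s : String => s == "") v.reverse = []
  · simp [List.rdropWhile, List.reverse_append, List.dropWhile_append, h]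
  · simp [List.rdropWhile, List.reverse_append, List.dropWhile_append, h, List.isEmpty_iff]

theorem pvDropWhile_head (q : String → Bool) (xs : List String) (e : String)
    (d' : List String) (h : xs.dropWhile q = e :: d') : q e = false := by
  induction xs with
  | nil => simp at h
  | cons a t ih =>
    by_cases ha : q a
    · rw [List.dropWhile_cons_of_pos ha] at h; exact ih h
    · rw [List.dropWhile_cons_of_neg ha] at h
      cases h
      simpa using ha

theorem pvBlocksL_head_ne_nil : ∀ (l : List String) (b : List String) (bs : List (List String)),
    pvBlocksL l = b :: bs → b ≠ []
  | [] => by intro b bs h; rw [pvBlocksL] at h; cases h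
  | x :: xs => by
    intro b bs h
    rw [pvBlocksL] at h
    split at h
    · exact pvBlocksL_head_ne_nil xs b bs h
    · cases h; simp
termination_by l => l.length
decreasing_by simp

theorem pvTrimBack_coll : ∀ (l : List String),
    List.rdropWhile (fun s => s == "") (pvColl true l) = pvJoinB (pvBlocksL l)
  | [] => by rw [pvBlocksL]; simp [pvColl, pvJoinB, List.rdropWhile]
  | x :: xs => by
    by_cases hx : x = ""
    · rw [pvBlocksL, if_pos hx]
      have ih := pvTrimBack_coll xs
      simpa [pvColl, hx] using ih
    · rw [pvBlocksL, if_neg hx]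
      have hcoll : pvColl true (x :: xs) = x :: pvColl false xs := by
        simp [pvColl, hx]
      have htw : ∀ s ∈ xs.takeWhile (fun s => s != ""), s ≠ "" := by
        intro s hs
        simpa using List.mem_takeWhile_imp hs
      have hsplit : pvColl false xs
          = xs.takeWhile (fun s => s != "")
            ++ pvColl false (xs.dropWhile (fun s => s != "")) := by
        conv_lhs => rw [← List.takeWhile_append_dropWhile
          (p := fun s : String => s != "") (l := xs)]
        exact pvColl_false_pre _ htw _
      have hall : ∀ y ∈ x :: xs.takeWhile (fun s => s != ""), y ≠ "" := by
        intro y hy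
        rcases List.mem_cons.mp hy with rfl | hyt
        · exact hx
        · exact htw y hyt
      have hdisj : xs.dropWhile (fun s => s != "") = []
          ∨ ∃ d', xs.dropWhile (fun s => s != "") = "" :: d' := by
        cases h : xs.dropWhile (fun s => s != "") with
        | nil => exact Or.inl rfl
        | cons e d' =>
          refine Or.inr ⟨d', ?_⟩
          have he : e = "" := by simpa using pvDropWhile_head _ xs e d' h
          rw [he]
      rcases hdisj with hcd | ⟨d', hcd⟩
      · rw [hcoll, hsplit, hcd]
        rw [show pvColl false [] = [] from rfl]
        simp only [List.append_nil]
        rw [pvRdw_id _ hall]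
        simp [pvBlocksL, pvJoinB]
      · have ih := pvTrimBack_coll (xs.dropWhile (fun s => s != ""))
        have hcd2 : pvColl false (xs.dropWhile (fun s => s != ""))
            = "" :: pvColl true (xs.dropWhile (fun s => s != "")) := by
          rw [hcd]; simp [pvColl]
        rw [hcoll, hsplit, hcd2]
        rw [show (x :: (xs.takeWhile (fun s => s != "")
              ++ "" :: pvColl true (xs.dropWhile (fun s => s != ""))) : List String)
            = (x :: xs.takeWhile (fun s => s != ""))
              ++ ([""] ++ pvColl true (xs.dropWhile (fun s => s != ""))) by simp]
        rw [pvRdw_append, pvRdw_append]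
        cases hbl : pvBlocksL (xs.dropWhile (fun s => s != "")) with
        | nil =>
          have hempty : List.rdropWhile (fun s => s == "")
              (pvColl true (xs.dropWhile (fun s => s != ""))) = [] := by
            rw [ih, hbl]; rfl
          rw [hempty]
          have h5 : List.rdropWhile (fun s : String => s == "") [""] = [] := by decide
          simp only [List.isEmpty_nil, h5]
          rw [pvRdw_id _ hall]
          simp [pvJoinB]
        | cons b bs =>
          have hb : b ≠ [] := pvBlocksL_head_ne_nil _ b bs hbl
          have hne : List.rdropWhile (fun s => s == "")
              (pvColl true (xs.dropWhile (fun s => s != ""))) ≠ [] := by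
            rw [ih, hbl]
            simp [pvJoinB, hb]
          have h6 : ¬ ((List.rdropWhile (fun s => s == "")
              (pvColl true (xs.dropWhile (fun s => s != "")))).isEmpty = true) := by
            simpa [List.isEmpty_iff] using hne
          rw [if_neg h6, if_neg (by simp)]
          rw [ih, hbl]
          simp [pvJoinB]
termination_by l => l.length
decreasing_by
  all_goals simp only [List.length_cons]
  · exact Nat.lt_succ_of_le (le_refl _)
  · exact Nat.lt_succ_of_le (List.length_dropWhile_le _ _)

-- B-side: the index scan computes takeWhile/dropWhile of the remaining suffix
theorem pvScanB_spec (l : List String) (i : Nat) :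
    (l.drop i).take (pvScanB l l.length i - i) = (l.drop i).takeWhile (fun s => s != "") ∧
    l.drop (pvScanB l l.length i) = (l.drop i).dropWhile (fun s => s != "") := by
  rw [pvScanB]
  split
  next h =>
    obtain ⟨h1, h2⟩ := h
    have hget : l.getD i "" = l[i] := List.getD_eq_getElem l "" h1
    have hdropi : l.drop i = l[i] :: l.drop (i + 1) := List.drop_eq_getElem_cons h1
    have hx : l[i] ≠ "" := by rw [← hget]; exact h2
    have ih := pvScanB_spec l (i + 1)
    have hge := pvScanB_ge l l.length (i + 1)
    constructor
    · rw [hdropi]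
      rw [show pvScanB l l.length (i + 1) - i = (pvScanB l l.length (i + 1) - (i + 1)) + 1 by omega]
      rw [List.take_succ_cons,
        List.takeWhile_cons_of_pos (p := fun s : String => s != "") (by simp [hx]), ih.1]
    · rw [ih.2, hdropi,
        List.dropWhile_cons_of_pos (p := fun s : String => s != "") (by simp [hx])]
  next h =>
    rw [Decidable.not_and_iff_not_or_not] at h
    rcases h with h | h
    · have : l.drop i = [] := List.drop_eq_nil_of_le (by omega)
      simp [this]
    · have h1 : i < l.length ∨ ¬ i < l.length := by omega
      rcases h1 with h1 | h1
      · have hget : l.getD i "" = l[i] := List.getD_eq_getElem l "" h1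
        have hval : l[i] = "" := by
          rw [← hget]; by_contra hc; exact h hc
        have hdropi : l.drop i = l[i] :: l.drop (i + 1) := List.drop_eq_getElem_cons h1
        constructor
        · rw [hdropi, Nat.sub_self, List.take_zero,
            List.takeWhile_cons_of_neg (p := fun s : String => s != "")
              (a := l[i]) (by simp [hval])]
        · rw [hdropi,
            List.dropWhile_cons_of_neg (p := fun s : String => s != "")
              (a := l[i]) (by simp [hval]), ← hdropi]
      · have : l.drop i = [] := List.drop_eq_nil_of_le (by omega)
        simp [this]
termination_by l.length - i
decreasing_by omega

theorem pvBlocksB_eq (l : List String) (i : Nat) :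
    pvBlocksB l l.length i = pvBlocksL (l.drop i) := by
  rw [pvBlocksB]
  split
  next h =>
    have hget : l.getD i "" = l[i] := List.getD_eq_getElem l "" h
    have hdropi : l.drop i = l[i] :: l.drop (i + 1) := List.drop_eq_getElem_cons h
    split
    next hc =>
      have := pvBlocksB_eq l (i + 1)
      rw [this, hdropi, pvBlocksL, if_pos (by rw [← hget, hc])]
    next hc =>
      have hxi : l[i] ≠ "" := by rw [← hget]; exact hc
      have hscan := pvScanB_spec l i
      have hj1 : pvScanB l l.length i = pvScanB l l.length (i + 1) := by
        rw [pvScanB, if_pos ⟨h, hc⟩]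
      have hge := pvScanB_ge l l.length (i + 1)
      have := pvBlocksB_eq l (pvScanB l l.length i)
      rw [this, hscan.1, hscan.2]
      rw [hdropi,
        List.takeWhile_cons_of_pos (p := fun s : String => s != "") (by simp [hxi]),
        List.dropWhile_cons_of_pos (p := fun s : String => s != "") (by simp [hxi])]
      conv_rhs => rw [pvBlocksL]
      rw [if_neg hxi]
  next h =>
    rw [List.drop_eq_nil_of_le (by omega), pvBlocksL]
termination_by l.length - i
decreasing_by
  all_goals omega

theorem clean_alt_eq (l : List String) :
    clean_empty_strings_alt l = pvJoinB (pvBlocksL l) := by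
  unfold clean_empty_strings_alt
  rw [show pvBlocksB l l.length 0 = pvBlocksL l by simpa using pvBlocksB_eq l 0]
  cases h : pvBlocksL l with
  | nil => rfl
  | cons b bs => simp [pvJoinB, List.flatMap_def]

-- ===== VERDICT (by name: the statement is the Claim_ definition above) =====
theorem clean_empty_strings_spec : Claim_equal_clean_empty_strings := by
  intro l _
  unfold Spec_clean_empty_strings clean_empty_strings
  rw [pvLoopA_eq, List.nil_append, pvTrimFrontA_coll, pvTrimBackA_eq_rdrop,
    pvTrimBack_coll, clean_alt_eq]
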